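-- pv_equiv track=rewrite | github.com/HyeryeongJoo/AI-Data-Quality-Agent-on-Amazon-Bedrock | web/backend/routers/data.py | _detect_id_column
-- ===== SOURCE A (Python) =====
-- def _detect_id_column(records: list[dict], columns: list[str]) -> str | None:
--     """Detect which column is most likely the record ID.
--
--     Priority:
--       1. 'record_id' already exists
--       2. 'id' column
--       3. Column whose name contains 'id' (e.g. order_id, tracking_id) with unique values
--       4. First column with all-unique, non-null values
--     Returns the column name, or None if no good candidate found.
--     """
--     col_lower = {c: c.lower() for c in columns}
--
--     # 1. Already has record_id
--     if "record_id" in col_lower.values():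
--         return None  # no mapping needed
--
--     # 2. Exact 'id'
--     for c, low in col_lower.items():
--         if low == "id":
--             vals = [r.get(c) for r in records]
--             if len(set(vals)) == len(records) and None not in vals:
--                 return c
--
--     # 3. Name contains 'id' + unique values
--     id_candidates = [c for c, low in col_lower.items() if "id" in low or "번호" in low or "코드" in low]
--     for c in id_candidates:
--         vals = [r.get(c) for r in records]
--         if len(set(vals)) == len(records) and None not in vals:
--             return c
--
--     # 4. First column with all-unique non-null values
--     for c in columns:
--         vals = [r.get(c) for r in records]
--         if len(set(vals)) == len(records) and None not in vals:
--             return c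
--
--     return None
-- ===== SOURCE B (Python) =====
-- def _detect_id_column(records: list[dict], columns: list[str]) -> str | None:
--     # Single pass: guard on record_id, then argmin over (priority tier, position)
--     # instead of three separate tiered early-return loops.
--     if any(c.lower() == "record_id" for c in columns):
--         return None
--     n = len(records)
--     best = None  # (tier, column)
--     for c in columns:
--         low = c.lower()
--         tier = 1 if low == "id" else 2 if ("id" in low or "번호" in low or "코드" in low) else 3
--         if best is None or tier < best[0]:
--             vals = [r.get(c) for r in records]
--             if len(set(vals)) == n and None not in vals:
--                 best = (tier, c)
--     return None if best is None else best[1]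
-- ===== Notes on version B (the rewrite author's own statement) =====
-- stated objective: alternative
-- what changed: Replaces the dict-build plus three tiered early-return loops by a single pass over columns that keeps an argmin of (priority tier, position) among unique-non-null columns, computing each column's values at most once.
import Mathlib
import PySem

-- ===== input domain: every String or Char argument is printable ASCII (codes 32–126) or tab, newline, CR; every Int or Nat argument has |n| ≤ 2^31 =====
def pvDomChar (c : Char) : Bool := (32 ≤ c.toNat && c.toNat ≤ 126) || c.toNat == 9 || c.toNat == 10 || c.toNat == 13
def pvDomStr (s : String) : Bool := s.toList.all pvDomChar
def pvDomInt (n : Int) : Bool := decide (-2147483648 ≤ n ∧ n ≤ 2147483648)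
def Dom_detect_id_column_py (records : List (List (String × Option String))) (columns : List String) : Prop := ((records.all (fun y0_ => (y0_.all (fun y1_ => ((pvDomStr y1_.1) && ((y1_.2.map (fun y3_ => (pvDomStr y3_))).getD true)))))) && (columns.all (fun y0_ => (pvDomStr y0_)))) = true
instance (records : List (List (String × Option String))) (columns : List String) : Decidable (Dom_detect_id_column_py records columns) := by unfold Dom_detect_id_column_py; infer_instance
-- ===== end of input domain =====

-- B replaces A's three tiered early-return loops by a single pass keeping an argmin of
-- (priority tier, position) among unique-non-null columns (alternative decomposition, same cost).

-- ===== PORT A =====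
-- vals = [r.get(c) for r in records]  (r.get with default None; a stored None and a missing key coincide, as in Python)
def pvVals (records : List (List (String × Option String))) (c : String) : List (Option String) :=
  records.map (fun r => (PySem.Dict.mk r).getD c none)

-- len(set(vals)) == len(records) and None not in vals   (both Pythons contain this test verbatim)
def pvQual (records : List (List (String × Option String))) (c : String) : Bool :=
  (PySem.Set.ofList (pvVals records c)).length == records.length && !((pvVals records c).contains none)

-- col_lower = {c: c.lower() for c in columns}
def pvColLower (columns : List String) : PySem.Dict String String :=
  columns.foldl (fun d c => d.insert c (PySem.Str.lower c)) PySem.Dict.empty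

-- "id" in low or "번호" in low or "코드" in low
def pvIsIdName (low : String) : Bool :=
  PySem.Str.isIn "id" low || PySem.Str.isIn "번호" low || PySem.Str.isIn "코드" low

-- step 2: for c, low in col_lower.items(): if low == "id": … return c (on success) … else keep looping
def pvStage2 (records : List (List (String × Option String))) :
    List (String × String) → Option String
  | [] => none
  | (c, low) :: rest =>
    if low == "id" then
      (if pvQual records c then some c else pvStage2 records rest)
    else pvStage2 records rest

-- steps 3 and 4 share this loop shape: for c in l: if <unique and non-null>: return c
def pvStage34 (records : List (List (String × Option String))) :
    List String → Option String
  | [] => none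
  | c :: rest => if pvQual records c then some c else pvStage34 records rest

def detect_id_column_py (records : List (List (String × Option String))) (columns : List String) : Option String :=
  -- col_lower = {c: c.lower() for c in columns}  (the local is the helper pvColLower, inlined)
  if ((pvColLower columns).values).contains "record_id" then none
  else
    match pvStage2 records (pvColLower columns).items with
    | some c => some c
    | none =>
      match pvStage34 records
          (((pvColLower columns).items.filter (fun p => pvIsIdName p.2)).map (·.1)) with
      | some c => some c
      | none => pvStage34 records columns

-- ===== PORT B =====
-- tier = 1 if low == "id" else 2 if ("id" in low or …) else 3
def pvTier (c : String) : Nat :=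
  if PySem.Str.lower c == "id" then 1
  else if pvIsIdName (PySem.Str.lower c) then 2 else 3

-- loop body: if best is None or tier < best[0]: if <unique and non-null>: best = (tier, c)
def pvStep (records : List (List (String × Option String)))
    (best : Option (Nat × String)) (c : String) : Option (Nat × String) :=
  let t := pvTier c
  if (match best with | none => true | some (bt, _) => decide (t < bt)) then
    (if pvQual records c then some (t, c) else best)
  else best

def detect_id_column_py_alt (records : List (List (String × Option String))) (columns : List String) : Option String :=
  if columns.any (fun c => PySem.Str.lower c == "record_id") then none
  else
    match columns.foldl (pvStep records) none with
    | none => none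
    | some (_, c) => some c

-- ===== PRECONDITION & SPEC =====
def Spec_detect_id_column_py (records : List (List (String × Option String))) (columns : List String) (out : Option String) : Prop := out = detect_id_column_py_alt records columns
instance (records : List (List (String × Option String))) (columns : List String) (out : Option String) : Decidable (Spec_detect_id_column_py records columns out) := by unfold Spec_detect_id_column_py; infer_instance

-- ===== CLAIM (what is proved, stated in full; the proofs are below) =====
def Claim_equal_detect_id_column_py : Prop := ∀ (records : List (List (String × Option String))) (columns : List String), Dom_detect_id_column_py records columns → Spec_detect_id_column_py records columns (detect_id_column_py records columns)

-- ===== LEMMAS AND PROOFS =====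

-- generic find? facts (coming searches in Mathlib/Batteries found no names for these)
theorem pvFind?_congr {α : Type} (p q : α → Bool) :
    ∀ (l : List α), (∀ a ∈ l, p a = q a) → l.find? p = l.find? q := by
  intro l
  induction l with
  | nil => intro _; rfl
  | cons a t ih =>
    intro h
    simp only [List.find?]
    rw [h a (by simp)]
    cases hq : q a with
    | true => rfl
    | false => exact ih (fun x hx => h x (by simp [hx]))

theorem pvFind?_append {α : Type} (p : α → Bool) :
    ∀ (l₁ l₂ : List α), (l₁ ++ l₂).find? p =
      (match l₁.find? p with | some a => some a | none => l₂.find? p) := by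
  intro l₁ l₂
  induction l₁ with
  | nil => rfl
  | cons a t ih =>
    simp only [List.cons_append, List.find?]
    cases p a with
    | true => rfl
    | false => exact ih

theorem pvFind?_filter {α : Type} (p q : α → Bool) :
    ∀ (l : List α), (l.filter p).find? q = l.find? (fun a => p a && q a) := by
  intro l
  induction l with
  | nil => rfl
  | cons a t ih =>
    simp only [List.filter, List.find?]
    cases hp : p a with
    | false => simpa using ih
    | true =>
      simp only [List.find?, Bool.true_and]
      cases q a with
      | true => rfl
      | false => exact ih

-- first match is not affected by first-occurrence dedup
theorem pvFind?_foldl_add {α : Type} [BEq α] [LawfulBEq α] (p : α → Bool) :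
    ∀ (l s : List α), (l.foldl PySem.Set.add s).find? p =
      (match s.find? p with | some a => some a | none => l.find? p) := by
  intro l
  induction l with
  | nil =>
    intro s
    cases hfs : s.find? p <;> simp [hfs]
  | cons a t ih =>
    intro s
    simp only [List.foldl_cons]
    rw [ih (PySem.Set.add s a)]
    by_cases hmem : a ∈ s
    · have hc : PySem.Set.contains s a = true := (PySem.Set.contains_iff s a).mpr hmem
      rw [show PySem.Set.add s a = s by simp [PySem.Set.add, hc, hmem]]
      cases hfs : s.find? p with
      | some b => rfl
      | none =>
        have hpa : p a = false := by
          simpa using List.find?_eq_none.mp hfs a hmem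
        simp [List.find?, hpa]
    · have hc : PySem.Set.contains s a = false := by
        cases hcc : PySem.Set.contains s a with
        | false => rfl
        | true => exact absurd ((PySem.Set.contains_iff s a).mp hcc) hmem
      rw [show PySem.Set.add s a = s ++ [a] by simp [PySem.Set.add, hc, hmem]]
      rw [pvFind?_append]
      cases hfs : s.find? p with
      | some b => rfl
      | none =>
        simp only [List.find?]
        cases p a with
        | true => rfl
        | false => rfl

theorem pvFind?_ofList {α : Type} [BEq α] [LawfulBEq α] (p : α → Bool) (l : List α) :
    (PySem.Set.ofList l).find? p = l.find? p := by
  rw [PySem.Set.ofList_eq_foldl, pvFind?_foldl_add]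
  rfl

-- the dict {c: c.lower() for c in columns}: lookups and shape
theorem pvColLower_getD (columns : List String) (c : String) (dflt : String) :
    (pvColLower columns).getD c dflt =
      if c ∈ columns then PySem.Str.lower c else dflt := by
  unfold pvColLower
  suffices h : ∀ (l : List String) (d : PySem.Dict String String),
      (l.foldl (fun d c => d.insert c (PySem.Str.lower c)) d).getD c dflt =
        if c ∈ l then PySem.Str.lower c else d.getD c dflt by
    rw [h]; simp [PySem.Dict.getD_empty]
  intro l
  induction l with
  | nil => intro d; simp
  | cons a t ih =>
    intro d
    simp only [List.foldl_cons]
    rw [ih]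
    by_cases hmem : c ∈ t
    · simp [hmem]
    · by_cases hca : c = a
      · subst hca; simp [hmem, PySem.Dict.getD_insert]
      · simp [hmem, hca, PySem.Dict.getD_insert_of_ne _ _ _ hca]

theorem pvColLower_keys (columns : List String) :
    (pvColLower columns).keys = PySem.Set.ofList columns := by
  unfold pvColLower
  rw [PySem.Dict.keys_foldl_insert]
  simp [PySem.Dict.keys_empty, PySem.Set.ofList_eq_foldl, PySem.Set.update]

theorem pvColLower_nodup (columns : List String) :
    (pvColLower columns).keys.Nodup := by
  unfold pvColLower
  exact PySem.Dict.nodup_keys_foldl_insert _ _ _ PySem.Dict.nodup_keys_empty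

theorem pvColLower_items (columns : List String) :
    (pvColLower columns).items =
      (PySem.Set.ofList columns).map (fun c => (c, PySem.Str.lower c)) := by
  rw [PySem.Dict.items_eq_map_keys _ (pvColLower_nodup columns) ""]
  rw [pvColLower_keys]
  apply List.map_congr_left
  intro c hc
  have hmem : c ∈ columns := (PySem.Set.mem_ofList _ _).mp hc
  rw [pvColLower_getD]
  simp [hmem]

-- guard equivalence
theorem pvGuard_eq (columns : List String) :
    ((pvColLower columns).values).contains "record_id" =
      columns.any (fun c => PySem.Str.lower c == "record_id") := by
  have hv : (pvColLower columns).values =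
      (PySem.Set.ofList columns).map PySem.Str.lower := by
    show (pvColLower columns).items.map (·.2) = _
    rw [pvColLower_items]; simp
  rw [hv, Bool.eq_iff_iff]
  simp only [List.contains_eq_any_beq, List.any_map, List.any_eq_true, Function.comp_apply]
  constructor <;> intro ⟨c, hc, h⟩
  · refine ⟨c, (PySem.Set.mem_ofList _ _).mp hc, ?_⟩
    rw [beq_iff_eq] at h ⊢
    exact h.symm
  · refine ⟨c, (PySem.Set.mem_ofList _ _).mpr hc, ?_⟩
    rw [beq_iff_eq] at h ⊢
    exact h.symm

-- tier facts
theorem pvTier_eq_one_iff (c : String) : (pvTier c == 1) = (PySem.Str.lower c == "id") := by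
  by_cases h : PySem.Str.lower c == "id"
  · simp [pvTier, h]
  · have h' : (PySem.Str.lower c == "id") = false := by simpa using h
    simp only [pvTier, h', Bool.false_eq_true, if_false]
    by_cases h2 : pvIsIdName (PySem.Str.lower c) = true <;> simp [h2]

theorem pvIsIdName_of_id (c : String) (h : PySem.Str.lower c == "id") :
    pvIsIdName (PySem.Str.lower c) = true := by
  rw [show PySem.Str.lower c = "id" from by simpa using h]
  decide

theorem pvIsIdName_iff_tier (c : String) :
    pvIsIdName (PySem.Str.lower c) = (pvTier c == 1 || pvTier c == 2) := by
  unfold pvTier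
  by_cases h1 : PySem.Str.lower c == "id"
  · simp only [h1, if_true]
    simp [pvIsIdName_of_id c h1]
  · simp only [Bool.not_eq_true] at h1
    simp only [h1, if_false]
    by_cases h2 : pvIsIdName (PySem.Str.lower c) = true <;> simp [h2]

-- the tiered find? predicates
def pvP (records : List (List (String × Option String))) (k : Nat) (c : String) : Bool :=
  pvTier c == k && pvQual records c

-- stage loops are find?s
theorem pvStage2_eq (records : List (List (String × Option String))) (l : List String) :
    pvStage2 records (l.map (fun c => (c, PySem.Str.lower c))) =
      l.find? (pvP records 1) := by
  induction l with
  | nil => rfl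
  | cons a t ih =>
    simp only [List.map_cons, pvStage2, List.find?]
    unfold pvP
    rw [pvTier_eq_one_iff]
    cases h : PySem.Str.lower a == "id" with
    | true =>
      simp only [Bool.true_and]
      cases pvQual records a with
      | true => rfl
      | false => exact ih
    | false => simpa using ih

theorem pvStage34_eq (records : List (List (String × Option String))) (l : List String) :
    pvStage34 records l = l.find? (pvQual records) := by
  induction l with
  | nil => rfl
  | cons a t ih =>
    simp only [pvStage34, List.find?]
    cases pvQual records a with
    | true => rfl
    | false => exact ih

-- drop a disjunct that never fires from a guarded find?
theorem pvFind?_or_none {α : Type} (a b q : α → Bool) (l : List α)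
    (h : l.find? (fun x => a x && q x) = none) :
    l.find? (fun x => (a x || b x) && q x) = l.find? (fun x => b x && q x) := by
  apply pvFind?_congr
  intro x hx
  have hne := List.find?_eq_none.mp h x hx
  by_cases hq : q x = true
  · have ha : a x = false := by
      cases haa : a x with
      | false => rfl
      | true => exact absurd (by simp [haa, hq]) hne
    simp [ha, hq]
  · have hq' : q x = false := by simpa using hq
    simp [hq']

-- B's fold: minimal-tier-first selection, characterized
def pvBest (records : List (List (String × Option String))) (t : Nat) :
    List String → Option (Nat × String)
  | [] => none
  | c :: rest =>
    if pvTier c < t ∧ pvQual records c then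
      some ((pvBest records (pvTier c) rest).getD (pvTier c, c))
    else pvBest records t rest

theorem pvFoldl_step_some (records : List (List (String × Option String))) :
    ∀ (l : List String) (t : Nat) (c0 : String),
      l.foldl (pvStep records) (some (t, c0)) =
        some ((pvBest records t l).getD (t, c0)) := by
  intro l
  induction l with
  | nil => intro t c0; rfl
  | cons c rest ih =>
    intro t c0
    simp only [List.foldl_cons, pvStep, pvBest]
    by_cases hlt : pvTier c < t
    · simp only [hlt, decide_true, if_true]
      by_cases hq : pvQual records c = true
      · simp [hq, ih]
      · simp only [Bool.not_eq_true] at hq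
        simp [hq, hlt, ih]
    · simp [hlt, ih]

theorem pvFoldl_step_none (records : List (List (String × Option String))) :
    ∀ (l : List String),
      l.foldl (pvStep records) none =
        (pvBest records 4 l).map (fun p => p) := by
  intro l
  induction l with
  | nil => rfl
  | cons c rest ih =>
    simp only [List.foldl_cons, pvStep, pvBest]
    have h4 : pvTier c < 4 := by unfold pvTier; split <;> [omega; (split <;> omega)]
    by_cases hq : pvQual records c = true
    · simp [hq, h4, pvFoldl_step_some]
    · simp only [Bool.not_eq_true] at hq
      simp [hq, h4, ih]

theorem pvTier_cases (c : String) : pvTier c = 1 ∨ pvTier c = 2 ∨ pvTier c = 3 := by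
  unfold pvTier; split <;> [omega; (split <;> omega)]

-- characterize pvBest by three guarded find?s
theorem pvBest_eq (records : List (List (String × Option String))) :
    ∀ (l : List String) (t : Nat),
      pvBest records t l =
        match (if 1 < t then l.find? (pvP records 1) else none) with
        | some c => some (1, c)
        | none =>
          match (if 2 < t then l.find? (pvP records 2) else none) with
          | some c => some (2, c)
          | none =>
            match (if 3 < t then l.find? (pvP records 3) else none) with
            | some c => some (3, c)
            | none => none := by
  intro l
  induction l with
  | nil =>
    intro t
    simp [pvBest, List.find?, ite_self]
  | cons c rest ih =>
    intro t
    simp only [pvBest, List.find?]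
    by_cases hq : pvQual records c = true
    · rcases pvTier_cases c with h1 | h2 | h3
      · by_cases ht : 1 < t
        · simp only [h1, ht, and_true, hq, if_true]
          have : pvP records 1 c = true := by simp [pvP, h1, hq]
          simp only [this]
          rw [ih 1]
          simp
        · have ht' : ¬ (pvTier c < t) := by omega
          simp only [h1] at ht'
          simp only [h1, ht', hq, and_true, if_false, ht]
          rw [ih t]
          have ht2 : ¬ (2 < t) := by omega
          have ht3 : ¬ (3 < t) := by omega
          simp [ht, ht2, ht3]
      · have hp1 : pvP records 1 c = false := by simp [pvP, h2]
        have hp3 : pvP records 3 c = false := by simp [pvP, h2]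
        by_cases ht : 2 < t
        · have ht1 : 1 < t := by omega
          simp only [h2, ht, and_true, hq, if_true]
          rw [ih 2]
          simp only [show (1:Nat) < 2 by omega, if_true, show ¬((2:Nat) < 2) by omega,
            if_false, show ¬((3:Nat) < 2) by omega]
          simp only [ht1, ht, if_true, hp1, hp3, cond_false]
          cases hf1 : rest.find? (pvP records 1) with
          | some c' => simp [hf1]
          | none =>
            have hp2 : pvP records 2 c = true := by simp [pvP, h2, hq]
            simp [hf1, hp2]
        · have ht' : ¬ (pvTier c < t) := by omega
          simp only [h2] at ht'
          simp only [h2, ht', hq, and_true, if_false]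
          rw [ih t]
          have ht3 : ¬ (3 < t) := by omega
          by_cases ht1 : 1 < t
          · simp [ht1, ht, ht3, hp1, hp3]
          · simp [ht1, ht, ht3]
      · have hp1 : pvP records 1 c = false := by simp [pvP, h3]
        have hp2 : pvP records 2 c = false := by simp [pvP, h3]
        by_cases ht : 3 < t
        · have ht1 : 1 < t := by omega
          have ht2 : 2 < t := by omega
          simp only [h3, ht, and_true, hq, if_true]
          rw [ih 3]
          simp only [show (1:Nat) < 3 by omega, show (2:Nat) < 3 by omega,
            show ¬((3:Nat) < 3) by omega, if_true, if_false]
          simp only [ht1, ht2, ht, if_true, hp1, hp2, cond_false]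
          cases hf1 : rest.find? (pvP records 1) with
          | some c' => simp [hf1]
          | none =>
            cases hf2 : rest.find? (pvP records 2) with
            | some c' => simp [hf1, hf2]
            | none =>
              have hp3 : pvP records 3 c = true := by simp [pvP, h3, hq]
              simp [hf1, hf2, hp3]
        · have ht' : ¬ (pvTier c < t) := by omega
          simp only [h3] at ht'
          simp only [h3, ht', hq, and_true, if_false]
          rw [ih t]
          by_cases ht1 : 1 < t <;> by_cases ht2 : 2 < t <;>
            simp [ht1, ht2, ht, hp1, hp2]
    · simp only [Bool.not_eq_true] at hq
      have hp : ∀ k, pvP records k c = false := by intro k; simp [pvP, hq]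
      simp only [hq, and_false, if_false]
      rw [ih t]
      by_cases ht1 : 1 < t <;> by_cases ht2 : 2 < t <;> by_cases ht3 : 3 < t <;>
        simp [ht1, ht2, ht3, hp]

-- qual splits along the tiers once the earlier tiers are exhausted
theorem pvFind?_qual_split (records : List (List (String × Option String))) (l : List String)
    (h1 : l.find? (pvP records 1) = none) (h2 : l.find? (pvP records 2) = none) :
    l.find? (pvQual records) = l.find? (pvP records 3) := by
  apply pvFind?_congr
  intro c hc
  have e1 := List.find?_eq_none.mp h1 c hc
  have e2 := List.find?_eq_none.mp h2 c hc
  simp only [pvP, Bool.and_eq_true, not_and, Bool.not_eq_true] at e1 e2 ⊢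
  rcases pvTier_cases c with h | h | h
  · by_cases hq : pvQual records c = true
    · rw [e1 (by simp [h])] at hq; exact absurd hq (by simp)
    · simp only [Bool.not_eq_true] at hq; simp [pvP, hq]
  · by_cases hq : pvQual records c = true
    · rw [e2 (by simp [h])] at hq; exact absurd hq (by simp)
    · simp only [Bool.not_eq_true] at hq; simp [pvP, hq]
  · simp [pvP, h]

-- ===== VERDICT (by name: the statement is the Claim_ definition above) =====
theorem detect_id_column_py_spec : Claim_equal_detect_id_column_py := by
  intro records columns _
  show detect_id_column_py records columns = detect_id_column_py_alt records columns
  unfold detect_id_column_py detect_id_column_py_alt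
  rw [pvGuard_eq]
  cases hg : columns.any (fun c => PySem.Str.lower c == "record_id") with
  | true => simp
  | false =>
    simp only [if_false, Bool.false_eq_true]
    rw [pvFoldl_step_none, pvColLower_items, pvStage2_eq, pvFind?_ofList]
    -- stage 3: filtered items loop = find? over columns with (tier ∈ {1,2}) ∧ qual
    have hstage3 :
        pvStage34 records
            ((((PySem.Set.ofList columns).map (fun c => (c, PySem.Str.lower c))).filter
              (fun p => pvIsIdName p.2)).map (·.1)) =
          columns.find? (fun c => (pvTier c == 1 || pvTier c == 2) && pvQual records c) := by
      rw [pvStage34_eq]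
      have hml : (((PySem.Set.ofList columns).map (fun c => (c, PySem.Str.lower c))).filter
            (fun p => pvIsIdName p.2)).map (·.1) =
          (PySem.Set.ofList columns).filter (fun c => pvIsIdName (PySem.Str.lower c)) := by
        rw [List.filter_map, List.map_map]
        simp [Function.comp_def]
      rw [hml, pvFind?_filter]
      rw [pvFind?_congr _ (fun c => (pvTier c == 1 || pvTier c == 2) && pvQual records c) _
        (fun c _ => by rw [pvIsIdName_iff_tier])]
      exact pvFind?_ofList _ _
    rw [hstage3, pvBest_eq, pvStage34_eq]
    simp only [show (1:Nat) < 4 by omega, show (2:Nat) < 4 by omega,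
      show (3:Nat) < 4 by omega, if_true]
    cases hf1 : columns.find? (pvP records 1) with
    | some c => simp [hf1]
    | none =>
      have hor := pvFind?_or_none (fun c => pvTier c == 1) (fun c => pvTier c == 2)
        (pvQual records) columns (by simpa [pvP] using hf1)
      simp only [hf1]
      cases hf2 : columns.find? (pvP records 2) with
      | some c =>
        have : columns.find? (fun c => (pvTier c == 1 || pvTier c == 2) && pvQual records c)
            = some c := by rw [hor]; simpa [pvP] using hf2
        simp [this, hf2]
      | none =>
        have hnone : columns.find? (fun c => (pvTier c == 1 || pvTier c == 2) && pvQual records c)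
            = none := by rw [hor]; simpa [pvP] using hf2
        rw [hnone, pvFind?_qual_split records columns hf1 hf2]
        cases hf3 : columns.find? (pvP records 3) with
        | some c => simp [hf3]
        | none => simp [hf3]
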